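-- pv_equiv track=rewrite | github.com/YurenHao0426/jsd | scripts/eval_bias_baseline.py | first_gender_span
-- ===== SOURCE A (Python) =====
-- from typing import List, Dict, Tuple, Optional
--
-- def first_gender_span(text: str, fem_words: List[str], male_words: List[str]) -> Optional[Tuple[int, int, str]]:
--     """
--     Find first occurrence (case-insensitive) of any gender word; return (start,end,group)
--     group in {"F","M"}.
--     """
--     lower = text.lower()
--     # prefer pronouns first (single-token in most tokenizers)
--     fem_sorted = sorted(fem_words, key=len)  # short first
--     male_sorted = sorted(male_words, key=len)
--     for group, vocab in (("F", fem_sorted), ("M", male_sorted)):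
--         for w in vocab:
--             i = lower.find(w)
--             if i != -1:
--                 return i, i + len(w), group
--     return None
-- ===== SOURCE B (Python) =====
-- from typing import List, Optional, Tuple
--
-- def first_gender_span(text: str, fem_words: List[str], male_words: List[str]) -> Optional[Tuple[int, int, str]]:
--     """Single pass per vocabulary: keep the first word of minimal length that
--     occurs in the lowered text (no sort), then report its first position."""
--     lower = text.lower()
--     for group, vocab in (("F", fem_words), ("M", male_words)):
--         best = None
--         for w in vocab:
--             if (best is None or len(w) < len(best)) and w in lower:
--                 best = w
--         if best is not None:
--             i = lower.find(best)
--             return i, i + len(best), group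
--     return None
-- ===== Notes on version B (the rewrite author's own statement) =====
-- stated objective: simpler
-- what changed: B drops the per-vocabulary length-sort and early-exit scan of the sorted list, and instead makes one min-tracking pass over each vocabulary keeping the first occurring word of minimal length (testing the length bound before the substring search), then reports that word's first position.
import Mathlib
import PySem

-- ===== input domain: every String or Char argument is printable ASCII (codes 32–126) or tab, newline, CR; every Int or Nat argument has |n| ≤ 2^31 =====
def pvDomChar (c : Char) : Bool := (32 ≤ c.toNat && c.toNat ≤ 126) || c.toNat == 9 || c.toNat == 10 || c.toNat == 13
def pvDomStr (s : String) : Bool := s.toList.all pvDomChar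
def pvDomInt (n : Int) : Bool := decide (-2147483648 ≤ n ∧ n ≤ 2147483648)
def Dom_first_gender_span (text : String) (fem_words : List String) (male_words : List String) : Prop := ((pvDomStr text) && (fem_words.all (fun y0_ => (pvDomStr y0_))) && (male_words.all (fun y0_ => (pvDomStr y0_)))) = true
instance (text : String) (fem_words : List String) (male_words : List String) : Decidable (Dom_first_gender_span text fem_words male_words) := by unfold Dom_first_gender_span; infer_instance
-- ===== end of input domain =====

-- B replaces A's per-vocabulary length-sort with a single min-tracking pass
-- (first word of minimal length that occurs, length-pruned); objective: simpler scan, no sort.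


-- ===== PORT A =====
-- inner 'for w in vocab: i = lower.find(w); if i != -1: return i, i+len(w), group'
def pvLoopA (lower : String) (vocab : List String) (group : String) : Option (Int × Int × String) :=
  match vocab with
  | [] => none
  | w :: ws =>
      let i := PySem.Str.find lower w
      if i ≠ -1 then some (i, i + PySem.Str.len w, group) else pvLoopA lower ws group

def first_gender_span (text : String) (fem_words : List String) (male_words : List String) : Option (Int × Int × String) :=
  let lower := PySem.Str.lower text
  let fem_sorted := PySem.List.sorted fem_words (fun w => PySem.Str.len w)
  let male_sorted := PySem.List.sorted male_words (fun w => PySem.Str.len w)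
  match pvLoopA lower fem_sorted "F" with
  | some r => some r
  | none => pvLoopA lower male_sorted "M"

-- ===== PORT B =====
-- 'if w in lower and (best is None or len(w) < len(best)): best = w'
def pvStepB (lower : String) (best : Option String) (w : String) : Option String :=
  if (match best with | none => true | some b => decide (PySem.Str.len w < PySem.Str.len b)) &&
      PySem.Str.isIn w lower then
    some w
  else best

def first_gender_span_alt (text : String) (fem_words : List String) (male_words : List String) : Option (Int × Int × String) :=
  let lower := PySem.Str.lower text
  match fem_words.foldl (pvStepB lower) none with
  | some w => some (PySem.Str.find lower w, PySem.Str.find lower w + PySem.Str.len w, "F")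
  | none =>
    match male_words.foldl (pvStepB lower) none with
    | some w => some (PySem.Str.find lower w, PySem.Str.find lower w + PySem.Str.len w, "M")
    | none => none

-- ===== PRECONDITION & SPEC =====
def Spec_first_gender_span (text : String) (fem_words : List String) (male_words : List String) (out : Option (Int × Int × String)) : Prop := out = first_gender_span_alt text fem_words male_words
instance (text : String) (fem_words : List String) (male_words : List String) (out : Option (Int × Int × String)) : Decidable (Spec_first_gender_span text fem_words male_words out) := by unfold Spec_first_gender_span; infer_instance

-- ===== CLAIM (what is proved, stated in full; the proofs are below) =====
def Claim_equal_first_gender_span : Prop := ∀ (text : String) (fem_words : List String) (male_words : List String), Dom_first_gender_span text fem_words male_words → Spec_first_gender_span text fem_words male_words (first_gender_span text fem_words male_words)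

-- ===== LEMMAS AND PROOFS =====

-- inserting x into a key-sorted list: the first P-element of the result
theorem pv_find?_insertBy {α : Type} (P : α → Bool) (key : α → Int) (x : α) (ys : List α)
    (hs : ys.Pairwise (fun a b => key a ≤ key b)) :
    (PySem.List.insertBy (fun a b => decide (key a < key b)) x ys).find? P =
      match ys.find? P with
      | none => if P x then some x else none
      | some b => if P x && decide (key x < key b) then some x else some b := by
  induction ys with
  | nil =>
    simp [PySem.List.insertBy, List.find?]
  | cons y ys ih =>
    rcases List.pairwise_cons.mp hs with ⟨hy, hs'⟩
    by_cases hxy : key x < key y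
    · have hL : (PySem.List.insertBy (fun a b => decide (key a < key b)) x (y :: ys)) = x :: y :: ys := by
        simp [PySem.List.insertBy, hxy]
      rw [hL, List.find?_cons]
      cases hPx : P x
      · cases hf : List.find? P (y :: ys) <;> simp
      · cases hf : List.find? P (y :: ys) with
        | none => simp
        | some b =>
          have hb : b ∈ y :: ys := List.mem_of_find?_eq_some hf
          have hyb : key y ≤ key b := by
            rcases List.mem_cons.mp hb with h | h
            · simp [h]
            · exact hy b h
          have hxb : key x < key b := lt_of_lt_of_le hxy hyb
          simp [hxb]
    · simp only [PySem.List.insertBy, hxy, decide_false, Bool.false_eq_true, if_false]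
      cases hPy : P y
      · simp only [List.find?_cons, hPy]
        exact ih hs'
      · simp [hPy, hxy]

-- first P-element of the stable length-sort = B's min-tracking fold
theorem pv_find?_sorted_eq_foldl {α : Type} (P : α → Bool) (key : α → Int) (xs : List α) :
    (PySem.List.sorted xs key).find? P =
      xs.foldl (fun best x =>
        if P x && (match best with | none => true | some b => decide (key x < key b)) then some x
        else best) none := by
  induction xs using List.reverseRecOn with
  | nil => rfl
  | append_singleton xs x ih =>
    have h1 : PySem.List.sorted (xs ++ [x]) key =
        PySem.List.insertBy (fun a b => decide (key a < key b)) x (PySem.List.sorted xs key) := by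
      rw [PySem.List.sorted_eq_foldl_insertBy, PySem.List.sorted_eq_foldl_insertBy,
        List.foldl_append]
      rfl
    rw [h1, pv_find?_insertBy P key x _ (PySem.List.sorted_pairwise xs key), ih,
      List.foldl_append]
    cases List.foldl _ none xs <;> simp

-- Python 'w in lower' and 'lower.find(w) != -1' test the same thing
theorem pv_isIn_eq_find_ne (lower w : String) :
    PySem.Str.isIn w lower = decide (PySem.Str.find lower w ≠ -1) := by
  simp only [PySem.Str.isIn_eq, PySem.Str.find_eq]
  by_cases h : w.toList <:+: lower.toList
  · rw [(PySem.Chars.isIn_iff_infix _ _).mpr h]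
    have h2 : PySem.Chars.find lower.toList w.toList ≠ -1 :=
      fun hc => ((PySem.Chars.find_eq_neg_one_iff _ _).mp hc) h
    simp [h2]
  · simp [(PySem.Chars.isIn_eq_false_iff _ _).mpr h, (PySem.Chars.find_eq_neg_one_iff _ _).mpr h]

-- A's early-returning inner loop is find? plus the span map
theorem pvLoopA_eq_find? (lower : String) (vocab : List String) (g : String) :
    pvLoopA lower vocab g =
      (vocab.find? (fun w => decide (PySem.Str.find lower w ≠ -1))).map
        (fun w => (PySem.Str.find lower w, PySem.Str.find lower w + PySem.Str.len w, g)) := by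
  induction vocab with
  | nil => rfl
  | cons w ws ih =>
    by_cases h : PySem.Chars.find lower.toList w.toList = -1
    · simp [pvLoopA, List.find?_cons, h, ih]
    · simp [pvLoopA, List.find?_cons, h]

-- per-vocabulary result of A (scan of the sorted list) = result of B (min-tracking fold)
theorem pv_vocab_eq (lower : String) (xs : List String) (g : String) :
    pvLoopA lower (PySem.List.sorted xs (fun w => PySem.Str.len w)) g =
      (xs.foldl (pvStepB lower) none).map
        (fun w => (PySem.Str.find lower w, PySem.Str.find lower w + PySem.Str.len w, g)) := by
  rw [pvLoopA_eq_find?,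
    pv_find?_sorted_eq_foldl (fun w => decide (PySem.Str.find lower w ≠ -1)) (fun w => PySem.Str.len w) xs]
  congr 1
  apply PySem.List.foldl_congr_mem
  intro acc x _
  simp only [pvStepB]
  rw [pv_isIn_eq_find_ne lower x]
  cases acc <;> simp [Bool.and_comm]

-- ===== VERDICT (by name: the statement is the Claim_ definition above) =====
theorem first_gender_span_spec : Claim_equal_first_gender_span := by
  intro text fem_words male_words _
  unfold Spec_first_gender_span
  simp only [first_gender_span, first_gender_span_alt]
  rw [pv_vocab_eq, pv_vocab_eq]
  cases fem_words.foldl (pvStepB (PySem.Str.lower text)) none <;>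
    cases male_words.foldl (pvStepB (PySem.Str.lower text)) none <;> rfl
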